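-- pv_equiv track=rewrite | github.com/jhyungit/programmers | others/lv2_디펜스 게임.py | solution
-- ===== SOURCE A (Python) =====
-- import heapq
--
-- def solution(n, k, enemy):
--     max_stage = 0
--     _sum = 0
--     max_heap = []
--     heapq.heapify(max_heap)
--
--     for e_num in enemy:
--         heapq.heappush(max_heap,-e_num)
--         _sum += e_num
--
--         if _sum > n:
--             if k == 0:
--                 break
--             x = heapq.heappop(max_heap)
--             _sum -= -x
--             k-=1
--         max_stage += 1
--
--     return max_stage
-- ===== SOURCE B (Python) =====
-- def solution(n, k, enemy):
--     survivors = []          # enemies fought so far, in arrival order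
--     dealt = 0               # damage taken so far
--     for stage, e in enumerate(enemy):
--         survivors.append(e)
--         dealt += e
--         if dealt > n:
--             if k == 0:
--                 return stage
--             big = max(survivors)
--             survivors.remove(big)
--             dealt -= big
--             k -= 1
--     return len(enemy)
-- ===== Notes on version B (the rewrite author's own statement) =====
-- stated objective: simpler
-- what changed: B drops the heapq negated max-heap entirely: it keeps the fought enemies in a plain list, linearly scans for max() only when the budget is exceeded, and early-returns the enumerate index instead of counting max_stage past a break.
import Mathlib
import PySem

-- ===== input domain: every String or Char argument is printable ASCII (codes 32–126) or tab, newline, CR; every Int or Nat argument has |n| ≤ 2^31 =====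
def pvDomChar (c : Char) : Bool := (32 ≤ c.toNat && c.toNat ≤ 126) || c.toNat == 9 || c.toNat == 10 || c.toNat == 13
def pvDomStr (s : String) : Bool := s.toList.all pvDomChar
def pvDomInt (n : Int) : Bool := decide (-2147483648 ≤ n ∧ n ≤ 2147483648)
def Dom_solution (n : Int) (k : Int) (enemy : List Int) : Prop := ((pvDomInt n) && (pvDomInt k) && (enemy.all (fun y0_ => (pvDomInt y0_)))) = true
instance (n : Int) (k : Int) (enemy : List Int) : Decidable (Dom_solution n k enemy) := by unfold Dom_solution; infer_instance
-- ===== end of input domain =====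

-- B replaces the heapq machinery by a plain survivor list with a linear max-scan; return values agree on every input.

-- ===== PORT A =====
-- heapq is not in PySem, so it is hand-ported step for step from CPython's heapq.py
-- (_siftdown / _siftup / heappush / heappop); exact for the int heaps Source A builds.

-- CPython _siftdown(heap, startpos, pos): newitem = heap[pos] is passed explicitly
-- (callers write it at pos just before); bubbles newitem up while a parent is larger.
def pySiftdown (startpos : Nat) (newitem : Int) (pos : Nat) (heap : List Int) : List Int :=
  if _h : startpos < pos then
    let parentpos := (pos - 1) / 2
    let parent := heap.getD parentpos 0
    if newitem < parent then
      pySiftdown startpos newitem parentpos (heap.set pos parent)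
    else
      heap.set pos newitem
  else
    heap.set pos newitem
termination_by pos
decreasing_by have := Nat.div_le_self (pos - 1) 2; omega

-- the smaller-child choice of CPython _siftup's loop body
def pyChild (heap : List Int) (endpos pos : Nat) : Nat :=
  if 2 * pos + 2 < endpos ∧ ¬ (heap.getD (2 * pos + 1) 0 < heap.getD (2 * pos + 2) 0) then
    2 * pos + 2
  else
    2 * pos + 1

-- CPython _siftup(heap, pos): move the smaller child up until a leaf, then _siftdown.
def pySiftup (endpos : Nat) (newitem : Int) (pos : Nat) (heap : List Int) : List Int :=
  if _h : 2 * pos + 1 < endpos then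
    let childpos := pyChild heap endpos pos
    pySiftup endpos newitem childpos (heap.set pos (heap.getD childpos 0))
  else
    pySiftdown 0 newitem pos heap
termination_by endpos - pos
decreasing_by simp only [pyChild] at *; split at * <;> omega

-- CPython heappush(heap, item): heap.append(item); _siftdown(heap, 0, len(heap)-1)
def pyHeappush (heap : List Int) (item : Int) : List Int :=
  pySiftdown 0 item heap.length (heap ++ [item])

-- CPython heappop(heap): lastelt = heap.pop(); if heap: returnitem = heap[0];
-- heap[0] = lastelt; _siftup(heap, 0); return returnitem; return lastelt.
-- (heap.pop() would raise IndexError on []; Source A only pops right after a push,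
-- so the heap is never empty and the [] case below is unreachable.)
def pyHeappop (heap : List Int) : Int × List Int :=
  let lastelt := heap.getD (heap.length - 1) 0
  let rest := heap.dropLast
  if rest.isEmpty then
    (lastelt, [])
  else
    (rest.getD 0 0, pySiftup rest.length lastelt 0 (rest.set 0 lastelt))

-- the for-loop of Source A, with break rendered as returning max_stage
def solutionLoop (n : Int) : List Int → Int → Int → List Int → Int → Int
  | [], maxStage, _sum, _heap, _k => maxStage
  | e :: rest, maxStage, sum, heap, k =>
    let heap1 := pyHeappush heap (-e)
    let sum1 := sum + e
    if sum1 > n then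
      if k = 0 then maxStage
      else
        let p := pyHeappop heap1
        solutionLoop n rest (maxStage + 1) (sum1 - (-p.1)) p.2 (k - 1)
    else
      solutionLoop n rest (maxStage + 1) sum1 heap1 k

def solution (n : Int) (k : Int) (enemy : List Int) : Int :=
  solutionLoop n enemy 0 0 [] k

-- ===== PORT B =====
-- Source B's loop: survivors list in arrival order, max() scan and remove() on overrun,
-- early return of the enumerate index, final return len(enemy).
-- max() is on the just-appended nonempty list and remove() on one of its members,
-- so the .getD defaults below are unreachable.
def altLoop (n : Int) (total : Int) : List Int → Int → Int → List Int → Int → Int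
  | [], _stage, _dealt, _survivors, _k => total
  | e :: rest, stage, dealt, survivors, k =>
    let survivors1 := survivors ++ [e]
    let dealt1 := dealt + e
    if dealt1 > n then
      if k = 0 then stage
      else
        let big := (PySem.List.max? survivors1 (fun y => y)).getD 0
        let survivors2 := (PySem.List.remove? survivors1 big).getD survivors1
        altLoop n total rest (stage + 1) (dealt1 - big) survivors2 (k - 1)
    else
      altLoop n total rest (stage + 1) dealt1 survivors1 k

def solution_alt (n : Int) (k : Int) (enemy : List Int) : Int :=
  altLoop n (enemy.length : Int) enemy 0 0 [] k

-- ===== PRECONDITION & SPEC =====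
def Spec_solution (n : Int) (k : Int) (enemy : List Int) (out : Int) : Prop := out = solution_alt n k enemy
instance (n : Int) (k : Int) (enemy : List Int) (out : Int) : Decidable (Spec_solution n k enemy out) := by unfold Spec_solution; infer_instance

-- ===== CLAIM (what is proved, stated in full; the proofs are below) =====
def Claim_equal_solution : Prop := ∀ (n : Int) (k : Int) (enemy : List Int), Dom_solution n k enemy → Spec_solution n k enemy (solution n k enemy)

-- ===== LEMMAS AND PROOFS =====

theorem getD_set_ne (l : List Int) (a b : Nat) (w : Int) (h : a ≠ b) :
    (l.set a w).getD b 0 = l.getD b 0 := by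
  simp [List.getD_eq_getElem?_getD, List.getElem?_set_ne h]

theorem getD_set_self (l : List Int) (b : Nat) (v : Int) (hb : b < l.length) :
    (l.set b v).getD b 0 = v := by
  simp [List.getD_eq_getElem?_getD, hb]

theorem consSetPerm : ∀ (t : List Int) (b : Nat) (v : Int), b < t.length →
    (t.getD b 0 :: t.set b v).Perm (v :: t) := by
  intro t
  induction t with
  | nil => intro b v hb; simp at hb
  | cons x tt ih =>
    intro b v hb
    cases b with
    | zero => simpa using List.Perm.swap v x tt
    | succ b =>
      simp only [List.getD_cons_succ, List.set_cons_succ]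
      exact ((List.Perm.swap _ _ _).trans ((ih b v (by simpa using hb)).cons x)).trans
        (List.Perm.swap _ _ _)

theorem setSwapPerm (l : List Int) (a b : Nat) (v : Int) (hab : a ≠ b)
    (ha : a < l.length) (hb : b < l.length) :
    ((l.set a (l.getD b 0)).set b v).Perm (l.set a v) := by
  have h1 : (l.getD b 0 :: (l.set a (l.getD b 0)).set b v).Perm (v :: l.set a (l.getD b 0)) := by
    have h := consSetPerm (l.set a (l.getD b 0)) b v (by simpa using hb)
    rwa [getD_set_ne _ _ _ _ hab] at h
  have h2 : (l.getD a 0 :: l.set a (l.getD b 0)).Perm (l.getD b 0 :: l) :=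
    consSetPerm l a (l.getD b 0) ha
  have h3 : (l.getD a 0 :: l.set a v).Perm (v :: l) := consSetPerm l a v ha
  have big : (l.getD a 0 :: l.getD b 0 :: (l.set a (l.getD b 0)).set b v).Perm
      (l.getD a 0 :: l.getD b 0 :: l.set a v) :=
    ((h1.cons _).trans (List.Perm.swap _ _ _)).trans
      (((h2.cons _).trans (List.Perm.swap _ _ _)).trans
        (((h3.symm.cons _).trans (List.Perm.swap _ _ _))))
  exact ((big.cons_inv).cons_inv)
theorem pyChild_bounds (heap : List Int) (endpos pos : Nat) (h : 2 * pos + 1 < endpos) :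
    pos < pyChild heap endpos pos ∧ pyChild heap endpos pos < endpos := by
  unfold pyChild; split <;> omega

theorem siftdown_perm (newitem : Int) : ∀ (pos : Nat) (heap : List Int), pos < heap.length →
    (pySiftdown 0 newitem pos heap).Perm (heap.set pos newitem) := by
  intro pos
  induction pos using Nat.strong_induction_on with
  | _ pos ih =>
    intro heap hlen
    rw [pySiftdown]
    split
    · next h =>
      dsimp only
      split
      · next hlt =>
        have hpp : (pos - 1) / 2 < pos := by have := Nat.div_le_self (pos - 1) 2; omega
        exact (ih _ hpp _ (by simpa using Nat.lt_of_lt_of_le hpp (Nat.le_of_lt hlen))).trans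
          (setSwapPerm heap pos ((pos - 1) / 2) newitem (by omega) hlen (by omega))
      · exact List.Perm.refl _
    · exact List.Perm.refl _

theorem siftup_perm (endpos : Nat) (newitem : Int) :
    ∀ (pos : Nat) (heap : List Int), pos < heap.length → endpos = heap.length →
    (pySiftup endpos newitem pos heap).Perm (heap.set pos newitem) := by
  intro pos heap
  induction pos, heap using pySiftup.induct endpos with
  | case1 pos heap h cp ih =>
    intro hp he
    have hc := pyChild_bounds heap endpos pos h
    rw [pySiftup]
    rw [dif_pos h]
    exact (ih (by simp; omega) (by simp [he])).trans
      (setSwapPerm heap pos (pyChild heap endpos pos) newitem (by omega) hp (by omega))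
  | case2 pos heap h =>
    intro hp he
    rw [pySiftup, dif_neg h]
    exact siftdown_perm newitem pos heap hp

theorem heappush_perm (heap : List Int) (item : Int) :
    (pyHeappush heap item).Perm (item :: heap) := by
  unfold pyHeappush
  have h1 := siftdown_perm item heap.length (heap ++ [item]) (by simp)
  have h2 : (heap ++ [item]).set heap.length item = heap ++ [item] := by
    apply List.ext_getElem <;> simp
  rw [h2] at h1
  exact h1.trans (List.perm_append_singleton _ _)

theorem heappop_fst (heap : List Int) :
    (pyHeappop heap).1 = heap.getD 0 0 := by
  unfold pyHeappop
  dsimp only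
  split
  · next h =>
    have hl : heap.length ≤ 1 := by
      have hd : heap.dropLast.length = heap.length - 1 := List.length_dropLast
      simp only [List.isEmpty_iff, ← List.length_eq_zero_iff] at h
      omega
    rcases heap with _ | ⟨x, t⟩
    · simp
    · rcases t with _ | _
      · simp
      · simp at hl
  · next h =>
    rcases heap with _ | ⟨x, t⟩
    · simp at h
    · rcases t with _ | ⟨y, tt⟩
      · simp at h
      · simp [List.dropLast]

theorem heappop_perm (heap : List Int) (hne : heap ≠ []) :
    ((pyHeappop heap).1 :: (pyHeappop heap).2).Perm heap := by
  unfold pyHeappop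
  dsimp only
  split
  · next h =>
    simp only [List.isEmpty_iff] at h
    rcases heap with _ | ⟨x, t⟩
    · simp at hne
    · rcases t with _ | _
      · simp
      · simp [List.dropLast] at h
  · next h =>
    simp only [List.isEmpty_iff] at h
    rcases heap with _ | ⟨x, t⟩
    · simp at hne
    · rcases ht : t.getLast? with _ | last
      · simp [List.getLast?_eq_none_iff] at ht
        subst ht; simp at h
      · -- heap = x :: t, t ≠ []
        have htne : t ≠ [] := by rintro rfl; simp at ht
        have hsp := siftup_perm (x :: t).dropLast.length ((x :: t).getD ((x :: t).length - 1) 0)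
          0 ((x :: t).dropLast.set 0 ((x :: t).getD ((x :: t).length - 1) 0))
          (by simp [List.length_dropLast]; exact List.length_pos_of_ne_nil htne)
          (by simp)
        rw [List.set_set] at hsp
        refine ((List.Perm.cons _ hsp).trans ?_)
        -- goal: getD 0 :: dropLast.set 0 lastelt ~ x :: t
        have hlast : (x :: t).getD ((x :: t).length - 1) 0 = (x :: t).getLast (by simp) := by
          simp [List.getD_eq_getElem?_getD, List.getLast_eq_getElem]
          rfl
        have hdl : (x :: t).dropLast = x :: t.dropLast := by
          simp [List.dropLast_cons_of_ne_nil htne]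
        rw [hdl]
        simp only [List.getD_cons_zero, List.set_cons_zero]
        -- x :: lastelt :: t.dropLast ~ x :: t
        refine List.Perm.cons x ?_
        rw [hlast]
        have : (x :: t).getLast (by simp) = t.getLast htne := List.getLast_cons htne
        rw [this]
        have hrec : t.dropLast ++ [t.getLast htne] = t := List.dropLast_concat_getLast htne
        calc (t.getLast htne :: t.dropLast).Perm (t.dropLast ++ [t.getLast htne]) :=
              (List.perm_append_singleton _ _).symm
          _ = t := hrec
def HeapInv (h : List Int) : Prop :=
  ∀ i, i < h.length → 0 < i → h.getD ((i - 1) / 2) 0 ≤ h.getD i 0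

theorem siftdown_inv (newitem : Int) : ∀ (pos : Nat) (heap : List Int), pos < heap.length →
    (∀ i, i < heap.length → 0 < i → i ≠ pos → (i - 1) / 2 ≠ pos →
      heap.getD ((i - 1) / 2) 0 ≤ heap.getD i 0) →
    (∀ c, c < heap.length → 0 < c → (c - 1) / 2 = pos → newitem ≤ heap.getD c 0) →
    (0 < pos → ∀ c, c < heap.length → 0 < c → (c - 1) / 2 = pos →
      heap.getD ((pos - 1) / 2) 0 ≤ heap.getD c 0) →
    HeapInv (pySiftdown 0 newitem pos heap) := by
  intro pos
  induction pos using Nat.strong_induction_on with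
  | _ pos ih =>
    intro heap hlen h1 h2 h3
    rw [pySiftdown]
    split
    · next hpos =>
      dsimp only
      split
      · next hlt =>
        -- recursive: heap2 = heap.set pos parent, new pos = pp
        set pp := (pos - 1) / 2 with hppdef
        have hpplt : pp < pos := by have := Nat.div_le_self (pos - 1) 2; omega
        have hpplen : pp < heap.length := lt_trans hpplt hlen
        have hset : ∀ j, j ≠ pos → (heap.set pos (heap.getD pp 0)).getD j 0 = heap.getD j 0 :=
          fun j hj => getD_set_ne _ _ _ _ (Ne.symm hj)
        have hsetp : (heap.set pos (heap.getD pp 0)).getD pos 0 = heap.getD pp 0 :=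
          getD_set_self _ _ _ hlen
        apply ih pp hpplt
        · simpa using hpplen
        · -- H1'
          intro i hi hi0 hip hpar
          simp only [List.length_set] at hi
          by_cases hipos : i = pos
          · subst hipos
            omega  -- par pos = pp contradiction with hpar
          · rw [hset i hipos]
            by_cases hparpos : (i - 1) / 2 = pos
            · rw [hparpos, hsetp]
              exact h3 (by omega) i hi hi0 hparpos
            · rw [hset _ hparpos]
              exact h1 i hi hi0 hipos hparpos
        · -- H2'
          intro c hc hc0 hcp
          simp only [List.length_set] at hc
          by_cases hcpos : c = pos
          · subst hcpos; rw [hsetp]; exact le_of_lt hlt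
          · rw [hset c hcpos]
            have := h1 c hc hc0 hcpos (by omega)
            rw [hcp] at this
            exact le_trans (le_of_lt hlt) this
        · -- H3'
          intro hpp0 c hc hc0 hcp
          simp only [List.length_set] at hc
          have hgp : (pp - 1) / 2 ≠ pos := by omega
          rw [hset _ hgp]
          have hgpp : heap.getD ((pp - 1) / 2) 0 ≤ heap.getD pp 0 :=
            h1 pp hpplen hpp0 (by omega) hgp
          by_cases hcpos : c = pos
          · subst hcpos; rw [hsetp]; exact hgpp
          · rw [hset c hcpos]
            exact le_trans hgpp (by
              have := h1 c hc hc0 hcpos (by omega)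
              rwa [hcp] at this)
      · next hge =>
        -- stop: parent ≤ newitem
        intro i hi hi0
        simp only [List.length_set] at hi
        have hset : ∀ j, j ≠ pos → (heap.set pos newitem).getD j 0 = heap.getD j 0 :=
          fun j hj => getD_set_ne _ _ _ _ (Ne.symm hj)
        have hsetp : (heap.set pos newitem).getD pos 0 = newitem := getD_set_self _ _ _ hlen
        by_cases hipos : i = pos
        · subst hipos
          rw [hsetp, hset _ (by omega)]
          omega
        · rw [hset i hipos]
          by_cases hparpos : (i - 1) / 2 = pos
          · rw [hparpos, hsetp]; exact h2 i hi hi0 hparpos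
          · rw [hset _ hparpos]; exact h1 i hi hi0 hipos hparpos
    · next hpos =>
      -- pos = 0
      have hpos0 : pos = 0 := by omega
      subst hpos0
      intro i hi hi0
      simp only [List.length_set] at hi
      have hset : ∀ j, j ≠ 0 → (heap.set 0 newitem).getD j 0 = heap.getD j 0 :=
        fun j hj => getD_set_ne _ _ _ _ (Ne.symm hj)
      have hsetp : (heap.set 0 newitem).getD 0 0 = newitem := getD_set_self _ _ _ hlen
      rw [hset i (by omega)]
      by_cases hparpos : (i - 1) / 2 = 0
      · rw [hparpos, hsetp]; exact h2 i hi hi0 hparpos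
      · rw [hset _ hparpos]; exact h1 i hi hi0 (by omega) hparpos

theorem pyChild_min (heap : List Int) (endpos pos : Nat) (_h : 2 * pos + 1 < endpos) :
    ∀ s, s < endpos → 0 < s → (s - 1) / 2 = pos →
    heap.getD (pyChild heap endpos pos) 0 ≤ heap.getD s 0 := by
  intro s hs hs0 hsp
  have hcase : s = 2 * pos + 1 ∨ s = 2 * pos + 2 := by omega
  unfold pyChild
  split
  · next hcond =>
    rcases hcase with rfl | rfl
    · omega
    · exact le_refl _
  · next hcond =>
    rcases hcase with rfl | rfl
    · exact le_refl _
    · rw [Classical.not_and_iff_not_or_not] at hcond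
      rcases hcond with hc | hc
      · omega
      · rw [not_not] at hc
        omega

theorem siftup_inv (endpos : Nat) (newitem : Int) :
    ∀ (pos : Nat) (heap : List Int), pos < heap.length → endpos = heap.length →
    (∀ i, i < heap.length → 0 < i → i ≠ pos → (i - 1) / 2 ≠ pos →
      heap.getD ((i - 1) / 2) 0 ≤ heap.getD i 0) →
    (0 < pos → ∀ c, c < heap.length → 0 < c → (c - 1) / 2 = pos →
      heap.getD ((pos - 1) / 2) 0 ≤ heap.getD c 0) →
    HeapInv (pySiftup endpos newitem pos heap) := by
  intro pos heap
  induction pos, heap using pySiftup.induct endpos with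
  | case1 pos heap h cp ih =>
    intro hp he k1 k3
    obtain ⟨hclo, hchi⟩ := pyChild_bounds heap endpos pos h
    have hmin := pyChild_min heap endpos pos h
    set c := pyChild heap endpos pos with hcdef
    have hclen : c < heap.length := by omega
    have hcchild : (c - 1) / 2 = pos := by
      unfold pyChild at hcdef
      split at hcdef <;> omega
    rw [pySiftup, dif_pos h]
    have hset : ∀ j, j ≠ pos → (heap.set pos (heap.getD c 0)).getD j 0 = heap.getD j 0 :=
      fun j hj => getD_set_ne _ _ _ _ (Ne.symm hj)
    have hsetp : (heap.set pos (heap.getD c 0)).getD pos 0 = heap.getD c 0 :=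
      getD_set_self _ _ _ hp
    apply ih
    · simpa using hclen
    · simpa using he
    · -- K1'
      intro i hi hi0 hic hpic
      simp only [List.length_set] at hi
      by_cases hipos : i = pos
      · subst hipos
        rw [hsetp, hset _ (by omega)]
        exact k3 hi0 c hclen (by omega) hcchild
      · rw [hset i hipos]
        by_cases hpip : (i - 1) / 2 = pos
        · rw [hpip, hsetp]
          exact hmin i (by omega) hi0 hpip
        · rw [hset _ hpip]
          exact k1 i hi hi0 hipos hpip
    · -- K3'
      intro _ d hd hd0 hdc
      simp only [List.length_set] at hd
      have hdpos : d ≠ pos := by omega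
      rw [hcchild, hsetp, hset d hdpos]
      have := k1 d hd hd0 hdpos (by omega)
      rwa [hdc] at this
  | case2 pos heap h =>
    intro hp he k1 k3
    rw [pySiftup, dif_neg h]
    exact siftdown_inv newitem pos heap hp k1 (fun c hc hc0 hcp => by omega) k3

theorem heappush_inv (heap : List Int) (item : Int) (h : HeapInv heap) :
    HeapInv (pyHeappush heap item) := by
  unfold pyHeappush
  apply siftdown_inv
  · simp
  · intro i hi hi0 hip _
    simp only [List.length_append, List.length_cons, List.length_nil] at hi
    have hilen : i < heap.length := by omega
    have hplen : (i - 1) / 2 < heap.length := by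
      have := Nat.div_le_self (i - 1) 2; omega
    have g1 : (heap ++ [item]).getD i 0 = heap.getD i 0 := by
      simp [List.getD_eq_getElem?_getD, List.getElem?_append_left hilen]
    have g2 : (heap ++ [item]).getD ((i - 1) / 2) 0 = heap.getD ((i - 1) / 2) 0 := by
      simp [List.getD_eq_getElem?_getD, List.getElem?_append_left hplen]
    rw [g1, g2]
    exact h i hilen hi0
  · intro c hc hc0 hcp
    simp only [List.length_append, List.length_cons, List.length_nil] at hc
    omega
  · intro hpos c hc hc0 hcp
    simp only [List.length_append, List.length_cons, List.length_nil] at hc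
    omega

theorem heappop_inv (heap : List Int) (h : HeapInv heap) :
    HeapInv (pyHeappop heap).2 := by
  unfold pyHeappop
  dsimp only
  split
  · intro i hi hi0; simp at hi
  · next hne =>
    simp only [List.isEmpty_iff] at hne
    have hlpos : 0 < heap.dropLast.length := List.length_pos_of_ne_nil hne
    apply siftup_inv
    · simpa using hlpos
    · simp
    · intro i hi hi0 hip hpip
      simp only [List.length_set] at hi
      have hset : ∀ j, j ≠ 0 →
          (heap.dropLast.set 0 (heap.getD (heap.length - 1) 0)).getD j 0
            = heap.dropLast.getD j 0 :=
        fun j hj => getD_set_ne _ _ _ _ (Ne.symm hj)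
      rw [hset i (by omega), hset _ (by omega)]
      have hdl : heap.dropLast.length = heap.length - 1 := List.length_dropLast
      have hg : ∀ j, j < heap.dropLast.length → heap.dropLast.getD j 0 = heap.getD j 0 := by
        intro j hj
        simp only [List.getD_eq_getElem?_getD]
        rw [List.getElem?_dropLast]
        simp only [hdl] at hj
        rw [if_pos hj]
      have hplt : (i - 1) / 2 < heap.dropLast.length := by
        have := Nat.div_le_self (i - 1) 2; omega
      rw [hg i hi, hg _ hplt]
      exact h i (by omega) hi0
    · intro h0; omega

theorem heapInv_root_min (h : List Int) (hi : HeapInv h) :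
    ∀ x ∈ h, h.getD 0 0 ≤ x := by
  have key : ∀ i, i < h.length → h.getD 0 0 ≤ h.getD i 0 := by
    intro i
    induction i using Nat.strong_induction_on with
    | _ i ih =>
      intro hilen
      rcases Nat.eq_zero_or_pos i with rfl | hi0
      · exact le_refl _
      · have hp : (i - 1) / 2 < i := by have := Nat.div_le_self (i - 1) 2; omega
        exact le_trans (ih _ hp (lt_trans hp hilen)) (hi i hilen hi0)
  intro x hx
  obtain ⟨i, hilen, rfl⟩ := List.mem_iff_getElem.mp hx
  have : h.getD i 0 = h[i] := by
    simp [List.getD_eq_getElem?_getD, List.getElem?_eq_getElem hilen]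
  rw [← this]
  exact key i hilen

theorem loop_eq (n total : Int) :
    ∀ (rem : List Int) (stage sum : Int) (heap survivors : List Int) (k : Int),
      HeapInv heap → heap.Perm (survivors.map (fun x => -x)) →
      stage + (rem.length : Int) = total →
      solutionLoop n rem stage sum heap k = altLoop n total rem stage sum survivors k := by
  intro rem
  induction rem with
  | nil =>
    intro stage sum heap survivors k _ _ htot
    simp only [solutionLoop, altLoop]
    simpa using htot
  | cons e rest ih =>
    intro stage sum heap survivors k hinv hperm htot
    simp only [solutionLoop, altLoop]
    have hperm1 : (pyHeappush heap (-e)).Perm ((survivors ++ [e]).map (fun x => -x)) := by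
      refine (heappush_perm heap (-e)).trans ?_
      rw [List.map_append]
      exact ((hperm.cons (-e)).trans (List.perm_append_singleton (-e) _).symm).trans
        (List.Perm.refl _)
    have hinv1 : HeapInv (pyHeappush heap (-e)) := heappush_inv heap (-e) hinv
    have htot1 : (stage + 1) + (rest.length : Int) = total := by
      rw [List.length_cons] at htot; push_cast at htot ⊢; omega
    split
    · split
      · rfl
      · -- pop branch
        have hne1 : pyHeappush heap (-e) ≠ [] := by
          intro hnil
          have := (heappush_perm heap (-e)).length_eq
          rw [hnil] at this; simp at this
        have hsurvne : survivors ++ [e] ≠ [] := by simp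
        -- big
        obtain ⟨big, hbig⟩ : ∃ b, PySem.List.max? (survivors ++ [e]) (fun y => y) = some b := by
          rcases hmx : PySem.List.max? (survivors ++ [e]) (fun y => y) with _ | b
          · exact absurd ((PySem.List.max?_eq_none_iff _ _).mp hmx) hsurvne
          · exact ⟨b, rfl⟩
        have hbigmem : big ∈ survivors ++ [e] := PySem.List.max?_mem hbig
        have hbigmax : ∀ y ∈ survivors ++ [e], y ≤ big := PySem.List.max?_isMax hbig
        -- pop value
        set h1 := pyHeappush heap (-e) with hh1
        have hvfst : (pyHeappop h1).1 = h1.getD 0 0 := heappop_fst h1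
        have hvmem : h1.getD 0 0 ∈ h1 := by
          rcases h1 with _ | ⟨x, t⟩
          · exact absurd rfl hne1
          · simp
        have hvmin : ∀ x ∈ h1, h1.getD 0 0 ≤ x := heapInv_root_min h1 hinv1
        have hveq : (pyHeappop h1).1 = -big := by
          rw [hvfst]
          have hmem2 : h1.getD 0 0 ∈ (survivors ++ [e]).map (fun x => -x) :=
            hperm1.mem_iff.mp hvmem
          obtain ⟨s, hs, hsv⟩ := List.mem_map.mp hmem2
          have hle1 : -big ≤ h1.getD 0 0 := by
            rw [← hsv]; have := hbigmax s hs; omega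
          have hle2 : h1.getD 0 0 ≤ -big := by
            apply hvmin
            apply hperm1.mem_iff.mpr
            exact List.mem_map.mpr ⟨big, hbigmem, rfl⟩
          omega
        -- remainder heap
        have hpermpop : ((pyHeappop h1).1 :: (pyHeappop h1).2).Perm h1 := heappop_perm h1 hne1
        have hperm2 : (pyHeappop h1).2.Perm
            (((survivors ++ [e]).erase big).map (fun x => -x)) := by
          have hc : ((pyHeappop h1).1 :: (pyHeappop h1).2).Perm
              ((survivors ++ [e]).map (fun x => -x)) := hpermpop.trans hperm1
          rw [hveq] at hc
          have := (List.cons_perm_iff_perm_erase.mp hc).2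
          rwa [show ((survivors ++ [e]).map (fun x => -x)).erase (-big)
              = ((survivors ++ [e]).erase big).map (fun x => -x) by
            rw [List.map_erase]; intro x y; simp] at this
        have hremove : (PySem.List.remove? (survivors ++ [e]) big).getD (survivors ++ [e])
            = (survivors ++ [e]).erase big := by
          rw [PySem.List.remove?_eq_some_erase _ _ hbigmem]; rfl
        rw [hbig]
        simp only [Option.getD_some]
        rw [hremove, hveq]
        have harith : sum + e - -(-big) = sum + e - big := by ring_nf
        rw [harith]
        exact ih (stage + 1) (sum + e - big) (pyHeappop h1).2 ((survivors ++ [e]).erase big)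
          (k - 1) (heappop_inv h1 hinv1) hperm2 htot1
    · exact ih (stage + 1) (sum + e) (pyHeappush heap (-e)) (survivors ++ [e]) k hinv1 hperm1 htot1

-- ===== VERDICT (by name: the statement is the Claim_ definition above) =====
theorem solution_spec : Claim_equal_solution := by
  intro n k enemy _hdom
  unfold Spec_solution solution solution_alt
  exact loop_eq n _ enemy 0 0 [] [] k (by intro i hi; simp at hi) (by simp) (by simp)
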